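-- pv_equiv track=rewrite | github.com/pbedn/python-course | homework_8/solutions/solutions.py | h30
-- ===== SOURCE A (Python) =====
-- def h30(n):
--     import queue
--     res = []
--     q = queue.LifoQueue()
--     for x in range(n):
--         q.put(str(x))
--     while not q.empty():
--         res.append(q.get())
--     return res
-- ===== SOURCE B (Python) =====
-- def h30(n):
--     return [str(x) for x in reversed(range(n))]
-- ===== Notes on version B (the rewrite author's own statement) =====
-- stated objective: simpler
-- what changed: Replaces A's two-pass push-onto-LifoQueue then drain-until-empty with a single direct comprehension over the range traversed in reverse, maintaining no auxiliary structure.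
import Mathlib
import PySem

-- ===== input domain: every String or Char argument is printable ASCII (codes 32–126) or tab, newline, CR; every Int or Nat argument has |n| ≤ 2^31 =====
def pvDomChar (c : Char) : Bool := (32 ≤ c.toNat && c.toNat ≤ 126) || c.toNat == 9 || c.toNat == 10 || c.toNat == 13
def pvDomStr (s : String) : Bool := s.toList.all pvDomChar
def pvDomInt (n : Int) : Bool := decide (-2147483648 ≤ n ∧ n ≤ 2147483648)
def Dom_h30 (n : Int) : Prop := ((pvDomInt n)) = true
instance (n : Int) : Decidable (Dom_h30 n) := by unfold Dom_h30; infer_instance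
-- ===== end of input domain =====

-- B replaces A's push-onto-stack-then-drain two-pass with one comprehension over the reversed range (simpler).


-- ===== PORT A =====
-- the while-not-empty drain loop: repeatedly get from the stack's top, appending to res
def h30_drain (res : List String) : List String → List String
  | [] => res
  | s :: st => h30_drain (res ++ [s]) st

def h30 (n : Int) : List String :=
  -- for x in range(n): q.put(str(x))   (LifoQueue: put pushes on top)
  let q := (PySem.List.pyRange 0 n 1).foldl (fun st x => PySem.Int.toStr x :: st) []
  h30_drain [] q

-- ===== PORT B =====
def h30_alt (n : Int) : List String :=
  ((PySem.List.pyRange 0 n 1).reverse).map PySem.Int.toStr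

-- ===== PRECONDITION & SPEC =====
def Spec_h30 (n : Int) (out : List String) : Prop := out = h30_alt n
instance (n : Int) (out : List String) : Decidable (Spec_h30 n out) := by unfold Spec_h30; infer_instance

-- ===== CLAIM (what is proved, stated in full; the proofs are below) =====
def Claim_equal_h30 : Prop := ∀ (n : Int), Dom_h30 n → Spec_h30 n (h30 n)

-- ===== LEMMAS AND PROOFS =====
theorem h30_drain_eq (st res : List String) : h30_drain res st = res ++ st := by
  induction st generalizing res with
  | nil => simp [h30_drain]
  | cons s st ih => simp [h30_drain, ih]

theorem h30_push_eq (l : List Int) (st : List String) :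
    l.foldl (fun st x => PySem.Int.toStr x :: st) st = (l.map PySem.Int.toStr).reverse ++ st := by
  induction l generalizing st with
  | nil => simp
  | cons x l ih => simp [List.foldl, ih]

-- ===== VERDICT (by name: the statement is the Claim_ definition above) =====
theorem h30_spec : Claim_equal_h30 := by
  intro n _
  unfold Spec_h30 h30 h30_alt
  rw [h30_drain_eq, h30_push_eq, List.map_reverse]
  simp
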